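-- pv_equiv track=rewrite | github.com/barahona-research-group/ICE-NODE | icenode/mimic3/dag.py | get_ccs_parents
-- ===== SOURCE A (Python) =====
-- def get_ccs_parents(ccs_code):
--     if ccs_code == 'root':
--         return []
--
--     indices = ccs_code.split('.')
--     parents = ['root']
--     for i in reversed(range(1, len(indices))):
--         parent = '.'.join(indices[0:i])
--         parents.append(parent)
--     return parents
-- ===== SOURCE B (Python) =====
-- def get_ccs_parents(ccs_code):
--     if ccs_code == 'root':
--         return []
--     prefixes = []
--     prefix = ''
--     for ch in ccs_code:
--         if ch == '.':
--             prefixes.append(prefix)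
--         prefix += ch
--     return ['root'] + prefixes[::-1]
-- ===== Notes on version B (the rewrite author's own statement) =====
-- stated objective: simpler
-- what changed: Replaces split-then-join over a reversed index range by a single character pass that records the running prefix at each dot separator, then prepends the root marker to the reversed prefix list.
import Mathlib
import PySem

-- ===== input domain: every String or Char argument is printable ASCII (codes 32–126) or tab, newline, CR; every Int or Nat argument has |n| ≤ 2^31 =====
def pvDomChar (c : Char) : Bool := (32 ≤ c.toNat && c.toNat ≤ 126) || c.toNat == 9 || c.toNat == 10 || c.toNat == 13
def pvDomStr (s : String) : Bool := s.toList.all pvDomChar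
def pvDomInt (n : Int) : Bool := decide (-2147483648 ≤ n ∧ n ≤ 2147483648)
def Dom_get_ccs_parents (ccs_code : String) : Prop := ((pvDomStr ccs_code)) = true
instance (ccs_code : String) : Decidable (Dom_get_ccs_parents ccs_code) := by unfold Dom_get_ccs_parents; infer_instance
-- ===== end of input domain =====

-- B replaces A's split/join over a reversed index range by one character pass that records
-- the running prefix at each '.' (objective: simpler).

-- ===== PORT A =====
-- A: split on '.', then for i in reversed(range(1, len(indices))) append '.'.join(indices[0:i]).
def get_ccs_parents (ccs_code : String) : List String :=
  if ccs_code = "root" then []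
  else
    let indices := PySem.Chars.splitOn ccs_code.toList ['.']
    (PySem.List.pyRange 1 (indices.length : Int)).reverse.foldl
      (fun parents i =>
        parents ++ [String.ofList (PySem.Chars.join ['.'] (PySem.List.slice indices (some 0) (some i)))])
      ["root"]

-- ===== PORT B =====
-- B: one pass; state = (prefixes recorded so far, running prefix); record prefix at each '.'.
def get_ccs_parents_alt (ccs_code : String) : List String :=
  if ccs_code = "root" then []
  else
    let st := ccs_code.toList.foldl
      (fun (acc : List (List Char) × List Char) ch =>
        ((if ch = '.' then acc.1 ++ [acc.2] else acc.1), acc.2 ++ [ch]))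
      ([], [])
    "root" :: (st.1.reverse.map String.ofList)

-- ===== PRECONDITION & SPEC =====
def Spec_get_ccs_parents (ccs_code : String) (out : List String) : Prop := out = get_ccs_parents_alt ccs_code
instance (ccs_code : String) (out : List String) : Decidable (Spec_get_ccs_parents ccs_code out) := by unfold Spec_get_ccs_parents; infer_instance

-- ===== CLAIM (what is proved, stated in full; the proofs are below) =====
def Claim_equal_get_ccs_parents : Prop := ∀ (ccs_code : String), Dom_get_ccs_parents ccs_code → Spec_get_ccs_parents ccs_code (get_ccs_parents ccs_code)

-- ===== LEMMAS AND PROOFS =====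

-- reference recursion for Python's s.split('.') (accumulator = current piece, reversed)
def pvSplitSpec : List Char → List Char → List (List Char)
  | [], cur => [cur.reverse]
  | c :: rest, cur => if c = '.' then cur.reverse :: pvSplitSpec rest [] else pvSplitSpec rest (c :: cur)

-- reference recursion for B's pass: the prefixes recorded ahead of each '.'
def pvDotPrefixes : List Char → List Char → List (List Char)
  | [], _ => []
  | c :: rest, pre => if c = '.' then pre :: pvDotPrefixes rest (pre ++ [c]) else pvDotPrefixes rest (pre ++ [c])

theorem pvSplitSpec_ne_nil (cs cur : List Char) : pvSplitSpec cs cur ≠ [] := by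
  induction cs generalizing cur with
  | nil => simp [pvSplitSpec]
  | cons c rest ih => by_cases h : c = '.' <;> simp [pvSplitSpec, h, ih]

theorem pvSplitSpec_acc (cs cur : List Char) :
    pvSplitSpec cs cur =
      (cur.reverse ++ (pvSplitSpec cs []).headI) :: (pvSplitSpec cs []).tail := by
  induction cs generalizing cur with
  | nil => simp [pvSplitSpec]
  | cons c rest ih =>
    by_cases h : c = '.'
    · simp [pvSplitSpec, h]
    · have h1 := ih (c :: cur)
      have h2 := ih [c]
      simp [pvSplitSpec, h, h1, h2]

theorem pvGo_eq (cs : List Char) : ∀ (fuel : Nat), cs.length < fuel →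
    ∀ (cur : List Char) (acc : List (List Char)),
      PySem.Chars.splitOn.go ['.'] fuel cs cur acc = acc.reverse ++ pvSplitSpec cs cur := by
  induction cs with
  | nil =>
    intro fuel hf cur acc
    match fuel, hf with
    | fuel + 1, _ => simp [PySem.Chars.splitOn.go, pvSplitSpec]
  | cons c rest ih =>
    intro fuel hf cur acc
    match fuel, hf with
    | fuel + 1, hf =>
      by_cases h : c = '.'
      · have hp : List.isPrefixOf ['.'] (c :: rest) = true := by simp [List.isPrefixOf, h]
        have hlt : rest.length < fuel := by simpa using Nat.lt_of_succ_lt_succ hf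
        simp only [PySem.Chars.splitOn.go, hp, if_pos]
        rw [show List.drop (['.'].length) (c :: rest) = rest by simp]
        rw [ih fuel hlt [] (cur.reverse :: acc)]
        simp [pvSplitSpec, h]
      · have hp : List.isPrefixOf ['.'] (c :: rest) = false := by simp [List.isPrefixOf, Ne.symm h]
        have hlt : rest.length < fuel := by simpa using Nat.lt_of_succ_lt_succ hf
        simp only [PySem.Chars.splitOn.go, hp]
        rw [if_neg (by simp)]
        rw [ih fuel hlt (c :: cur) acc]
        simp [pvSplitSpec, h]

theorem pvSplitOn_eq (cs : List Char) :
    PySem.Chars.splitOn cs ['.'] = pvSplitSpec cs [] := by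
  have := pvGo_eq cs (cs.length + 1) (Nat.lt_succ_self _) [] []
  simpa [PySem.Chars.splitOn] using this

theorem pvJoin_head (a x : List Char) (sep : List Char) (l : List (List Char)) :
    PySem.Chars.join sep ((a ++ x) :: l) = a ++ PySem.Chars.join sep (x :: l) := by
  cases l with
  | nil => simp [PySem.Chars.join_singleton]
  | cons b t => simp [PySem.Chars.join_cons_cons, List.append_assoc]

-- B's fold in terms of pvDotPrefixes
theorem pvFoldB (cs : List Char) : ∀ (ps : List (List Char)) (pre : List Char),
    cs.foldl
      (fun (acc : List (List Char) × List Char) ch =>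
        ((if ch = '.' then acc.1 ++ [acc.2] else acc.1), acc.2 ++ [ch]))
      (ps, pre) = (ps ++ pvDotPrefixes cs pre, pre ++ cs) := by
  induction cs with
  | nil => intro ps pre; simp [pvDotPrefixes]
  | cons c rest ih =>
    intro ps pre
    by_cases h : c = '.' <;> simp [pvDotPrefixes, h, ih]

-- A's fold is an append of a map
theorem pvFoldA (l : List Int) (init : List String) (f : Int → String) :
    l.foldl (fun parents i => parents ++ [f i]) init = init ++ l.map f := by
  induction l generalizing init with
  | nil => simp
  | cons a t ih => simp [ih, List.append_assoc]

theorem pvPyRange_eq (m : Nat) : PySem.List.pyRange 1 (1 + (m : Int)) =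
    (List.range m).map (fun (k : Nat) => 1 + (k : Int)) := by
  induction m with
  | zero => simp [PySem.List.pyRange_one_eq_nil]
  | succ n ih =>
    rw [show (1 : Int) + ((n + 1 : Nat) : Int) = (1 + (n : Int)) + 1 by push_cast; ring]
    rw [PySem.List.pyRange_one_succ_right (by omega), ih, List.range_succ]
    simp

-- the core correspondence: B's recorded prefixes are A's joined split prefixes
theorem pvMain (cs : List Char) : ∀ (pre : List Char),
    pvDotPrefixes cs pre =
      (List.range ((pvSplitSpec cs []).length - 1)).map
        (fun k => pre ++ PySem.Chars.join ['.'] ((pvSplitSpec cs []).take (k + 1))) := by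
  induction cs with
  | nil => intro pre; simp [pvSplitSpec, pvDotPrefixes]
  | cons c rest ih =>
    intro pre
    obtain ⟨H, T, hHT⟩ : ∃ H T, pvSplitSpec rest [] = H :: T := by
      cases hr : pvSplitSpec rest [] with
      | nil => exact absurd hr (pvSplitSpec_ne_nil rest [])
      | cons H T => exact ⟨H, T, rfl⟩
    by_cases h : c = '.'
    · -- pvSplitSpec ('.'::rest) [] = [] :: pvSplitSpec rest []
      have hs : pvSplitSpec (c :: rest) [] = [] :: H :: T := by
        simp [pvSplitSpec, h, hHT]
      rw [hs]
      have hlen : ([] :: H :: T).length - 1 = (T.length + 1 - 1) + 1 := by simp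
      rw [show pvDotPrefixes (c :: rest) pre = pre :: pvDotPrefixes rest (pre ++ [c]) by
        simp [pvDotPrefixes, h]]
      rw [hlen, List.range_succ_eq_map]
      rw [ih (pre ++ [c])]
      simp only [hHT, Nat.add_sub_cancel]
      congr 1
      · simp [PySem.Chars.join_singleton]
      · simp only [List.length_cons, Nat.add_sub_cancel, List.map_map]
        apply List.map_congr_left
        intro k _
        simp only [Function.comp, List.take_succ_cons]
        rw [PySem.Chars.join_cons_cons]
        simp [h, List.append_assoc]
    · -- pvSplitSpec (c::rest) [] = (c :: H) :: T
      have hs : pvSplitSpec (c :: rest) [] = (c :: H) :: T := by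
        have := pvSplitSpec_acc rest [c]
        simp [pvSplitSpec, h, this, hHT]
      rw [hs]
      rw [show pvDotPrefixes (c :: rest) pre = pvDotPrefixes rest (pre ++ [c]) by
        simp [pvDotPrefixes, h]]
      rw [ih (pre ++ [c]), hHT]
      simp only [List.length_cons]
      apply List.map_congr_left
      intro k _
      simp only [List.take_succ_cons]
      rw [show (c :: H) = [c] ++ H by rfl, pvJoin_head]
      simp [List.append_assoc]

-- ===== VERDICT (by name: the statement is the Claim_ definition above) =====
theorem get_ccs_parents_spec : Claim_equal_get_ccs_parents := by
  intro s _
  unfold Spec_get_ccs_parents get_ccs_parents get_ccs_parents_alt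
  by_cases hroot : s = "root"
  · simp [hroot]
  · simp only [hroot, reduceIte]
    rw [pvFoldB s.toList [] [], pvFoldA, pvSplitOn_eq]
    simp only [List.nil_append]
    obtain ⟨H, T, hHT⟩ : ∃ H T, pvSplitSpec s.toList [] = H :: T := by
      cases hr : pvSplitSpec s.toList [] with
      | nil => exact absurd hr (pvSplitSpec_ne_nil s.toList [])
      | cons H T => exact ⟨H, T, rfl⟩
    have hmain := pvMain s.toList []
    rw [hHT] at hmain
    simp only [List.length_cons, Nat.add_sub_cancel, List.nil_append] at hmain
    have hA : (PySem.List.pyRange 1 (((H :: T).length : Nat) : Int)).map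
        (fun i => String.ofList (PySem.Chars.join ['.'] (PySem.List.slice (H :: T) (some 0) (some i))))
        = (pvDotPrefixes s.toList []).map String.ofList := by
      rw [show (((H :: T).length : Nat) : Int) = 1 + (T.length : Int) by simp; ring]
      rw [pvPyRange_eq, hmain, List.map_map, List.map_map]
      apply List.map_congr_left
      intro k _
      simp only [Function.comp]
      congr 1
      rw [show (1 : Int) + (k : Int) = ((k + 1 : Nat) : Int) by push_cast; ring]
      rw [show (0 : Int) = ((0 : Nat) : Int) by simp]
      rw [PySem.List.slice_natCast]
      simp
    rw [hHT, List.map_reverse, List.map_reverse, hA]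
    simp
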